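-- pv_equiv track=rewrite | github.com/sslinkyy/AISubaruTuner | backend/tuning_engine_updated.py | _categorize_table
-- ===== SOURCE A (Python) =====
-- def _categorize_table(table_name: str) -> str:
--     """Categorize table by type"""
--     table_lower = table_name.lower()
--
--     if any(keyword in table_lower for keyword in ["fuel", "injector", "pulse"]):
--         return "Fuel"
--     elif any(keyword in table_lower for keyword in ["timing", "ignition"]):
--         return "Timing"
--     elif any(keyword in table_lower for keyword in ["boost", "wastegate"]):
--         return "Boost"
--     elif any(keyword in table_lower for keyword in ["idle", "iac"]):
--         return "Idle"
--     elif any(keyword in table_lower for keyword in ["learning", "correction"]):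
--         return "Learning"
--     else:
--         return "Other"
-- ===== SOURCE B (Python) =====
-- # Single left-to-right scan: collect the set of matched categories at every
-- # position via keyword prefix tests, then pick the highest-priority category.
-- KEYWORDS = [
--     ("fuel", "Fuel"), ("injector", "Fuel"), ("pulse", "Fuel"),
--     ("timing", "Timing"), ("ignition", "Timing"),
--     ("boost", "Boost"), ("wastegate", "Boost"),
--     ("idle", "Idle"), ("iac", "Idle"),
--     ("learning", "Learning"), ("correction", "Learning"),
-- ]
-- PRIORITY = ["Fuel", "Timing", "Boost", "Idle", "Learning"]
--
--
-- def _categorize_table(table_name: str) -> str: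
--     s = table_name.lower()
--     found = set()
--     for i in range(len(s) + 1):
--         for kw, cat in KEYWORDS:
--             if s.startswith(kw, i):
--                 found.add(cat)
--     for cat in PRIORITY:
--         if cat in found:
--             return cat
--     return "Other"
-- ===== Notes on version B (the rewrite author's own statement) =====
-- stated objective: alternative
-- what changed: Instead of an ordered short-circuiting cascade of substring tests, B makes one scan over all positions of the lowercased name, accumulating the SET of all categories whose keyword starts at some position, and then selects the first category of a priority list that is in the set.
import Mathlib
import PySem

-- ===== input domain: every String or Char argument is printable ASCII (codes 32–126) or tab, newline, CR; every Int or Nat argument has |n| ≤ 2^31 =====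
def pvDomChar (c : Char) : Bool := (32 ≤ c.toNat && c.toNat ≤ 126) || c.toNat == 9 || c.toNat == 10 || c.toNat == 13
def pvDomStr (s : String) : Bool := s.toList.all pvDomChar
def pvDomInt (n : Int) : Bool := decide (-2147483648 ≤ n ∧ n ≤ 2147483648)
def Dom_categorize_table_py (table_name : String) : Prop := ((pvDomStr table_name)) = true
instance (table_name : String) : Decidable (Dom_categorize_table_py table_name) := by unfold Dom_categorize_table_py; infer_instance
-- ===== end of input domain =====

-- B replaces A's short-circuiting if/elif cascade by one scan over all positions of the
-- lowercased name that accumulates the SET of matched categories, then a priority pick.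

-- ===== PORT A =====
def categorize_table_py (table_name : String) : String :=
  let table_lower := PySem.Str.lower table_name
  if ["fuel", "injector", "pulse"].any (fun keyword => PySem.Str.isIn keyword table_lower) then
    "Fuel"
  else if ["timing", "ignition"].any (fun keyword => PySem.Str.isIn keyword table_lower) then
    "Timing"
  else if ["boost", "wastegate"].any (fun keyword => PySem.Str.isIn keyword table_lower) then
    "Boost"
  else if ["idle", "iac"].any (fun keyword => PySem.Str.isIn keyword table_lower) then
    "Idle"
  else if ["learning", "correction"].any (fun keyword => PySem.Str.isIn keyword table_lower) then
    "Learning"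
  else
    "Other"

-- ===== PORT B =====
def pvKeywords : List (String × String) :=
  [("fuel", "Fuel"), ("injector", "Fuel"), ("pulse", "Fuel"),
   ("timing", "Timing"), ("ignition", "Timing"),
   ("boost", "Boost"), ("wastegate", "Boost"),
   ("idle", "Idle"), ("iac", "Idle"),
   ("learning", "Learning"), ("correction", "Learning")]

def pvPriority : List String := ["Fuel", "Timing", "Boost", "Idle", "Learning"]

-- the final 'for cat in PRIORITY: if cat in found: return cat' / 'return "Other"'
def pvFirstIn (found : PySem.Set String) : List String → String
  | [] => "Other"
  | cat :: rest => if PySem.Set.contains found cat then cat else pvFirstIn found rest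

def categorize_table_py_alt (table_name : String) : String :=
  let s := PySem.Str.lower table_name
  let found : PySem.Set String :=
    (PySem.List.pyRange 0 ((PySem.Str.len s : Int) + 1) 1).foldl
      (fun acc i =>
        pvKeywords.foldl
          (fun acc2 p =>
            -- s.startswith(kw, i): exact for 0 ≤ i (every i of the range) as startswith of s[i:]
            if PySem.Str.startswith (PySem.Str.slice s (some i) none) p.1 then
              PySem.Set.add acc2 p.2
            else acc2)
          acc)
      PySem.Set.empty
  pvFirstIn found pvPriority

-- ===== PRECONDITION & SPEC =====
def Spec_categorize_table_py (table_name : String) (out : String) : Prop := out = categorize_table_py_alt table_name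
instance (table_name : String) (out : String) : Decidable (Spec_categorize_table_py table_name out) := by unfold Spec_categorize_table_py; infer_instance

-- ===== CLAIM (what is proved, stated in full; the proofs are below) =====
def Claim_equal_categorize_table_py : Prop := ∀ (table_name : String), Dom_categorize_table_py table_name → Spec_categorize_table_py table_name (categorize_table_py table_name)

-- ===== LEMMAS AND PROOFS =====

-- membership in the inner fold (add-if over the keyword table)
theorem pv_mem_inner_fold (cond : String × String → Bool) (l : List (String × String))
    (acc : PySem.Set String) (x : String) :
    x ∈ l.foldl (fun a p => if cond p then PySem.Set.add a p.2 else a) acc ↔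
      x ∈ acc ∨ ∃ p ∈ l, cond p = true ∧ p.2 = x := by
  induction l generalizing acc with
  | nil => simp
  | cons hd tl ih =>
    by_cases h : cond hd <;>
      simp only [List.foldl_cons, h, if_true, ih, PySem.Set.mem_add, List.mem_cons] <;>
      aesop

-- membership in the outer fold (over the positions)
theorem pv_mem_outer_fold (cond : Int → String × String → Bool) (is : List Int)
    (acc : PySem.Set String) (x : String) :
    x ∈ is.foldl (fun a i =>
        pvKeywords.foldl (fun a2 p => if cond i p then PySem.Set.add a2 p.2 else a2) a) acc ↔
      x ∈ acc ∨ ∃ i ∈ is, ∃ p ∈ pvKeywords, cond i p = true ∧ p.2 = x := by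
  induction is generalizing acc with
  | nil => simp
  | cons hd tl ih =>
    simp only [List.foldl_cons, List.mem_cons, ih, pv_mem_inner_fold]
    aesop

-- a nonempty keyword starts at some scanned position iff it is a substring
theorem pv_exists_pos_iff_isIn (s kw : List Char) (hkw : kw ≠ []) :
    (∃ i ∈ PySem.List.pyRange 0 ((s.length : Int) + 1) 1,
        PySem.Chars.startswith (PySem.List.slice s (some i) none) kw = true) ↔
      PySem.Chars.isIn kw s = true := by
  constructor
  · rintro ⟨i, hi, hsw⟩
    rw [PySem.List.mem_pyRange_one] at hi
    obtain ⟨h0, _⟩ := hi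
    rw [PySem.List.slice_from _ h0] at hsw
    rw [PySem.Chars.startswith_iff] at hsw
    exact (PySem.Chars.exists_prefix_drop_iff_isIn kw s).mp ⟨i.toNat, hsw⟩
  · intro h
    obtain ⟨j, hj⟩ := (PySem.Chars.exists_prefix_drop_iff_isIn kw s).mpr h
    by_cases hle : j ≤ s.length
    · refine ⟨(j : Int), ?_, ?_⟩
      · rw [PySem.List.mem_pyRange_one]; constructor <;> omega
      · rw [PySem.List.slice_from_natCast, PySem.Chars.startswith_iff]
        exact hj
    · exfalso
      rw [List.drop_eq_nil_of_le (by omega)] at hj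
      exact hkw (List.prefix_nil.mp hj)

-- the Str-level condition used by port B, rephrased at Chars level
theorem pv_cond_eq (s : String) (i : Int) (kw : String) :
    PySem.Str.startswith (PySem.Str.slice s (some i) none) kw =
      PySem.Chars.startswith (PySem.List.slice s.toList (some i) none) kw.toList := by
  simp

-- found-set membership per category, stated for the concrete keyword table
theorem pv_mem_found (s : String) (cat : String) :
    (cat ∈ (PySem.List.pyRange 0 ((PySem.Str.len s : Int) + 1) 1).foldl
        (fun acc i =>
          pvKeywords.foldl
            (fun acc2 p =>
              -- s.startswith(kw, i): exact for 0 ≤ i (every i of the range) as startswith of s[i:]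
            if PySem.Str.startswith (PySem.Str.slice s (some i) none) p.1 then
                PySem.Set.add acc2 p.2
              else acc2)
            acc)
        PySem.Set.empty) ↔
      ∃ p ∈ pvKeywords, PySem.Chars.isIn p.1.toList s.toList = true ∧ p.2 = cat := by
  rw [pv_mem_outer_fold (fun i p => PySem.Str.startswith (PySem.Str.slice s (some i) none) p.1)]
  simp only [PySem.Set.empty, List.not_mem_nil, false_or]
  constructor
  · rintro ⟨i, hi, p, hp, hc, he⟩
    refine ⟨p, hp, ?_, he⟩
    rw [pv_cond_eq] at hc
    have hlen : (PySem.Str.len s : Int) = (s.toList.length : Int) := by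
      simp [PySem.Str.len_eq]
    rw [hlen] at hi
    refine (pv_exists_pos_iff_isIn s.toList p.1.toList ?_).mp ⟨i, hi, hc⟩
    fin_cases hp <;> decide
  · rintro ⟨p, hp, hin, he⟩
    have hkw : p.1.toList ≠ [] := by fin_cases hp <;> decide
    obtain ⟨i, hi, hc⟩ := (pv_exists_pos_iff_isIn s.toList p.1.toList hkw).mpr hin
    have hlen : (PySem.Str.len s : Int) = (s.toList.length : Int) := by
      simp [PySem.Str.len_eq]
    exact ⟨i, by rw [hlen]; exact hi, p, hp, by rw [pv_cond_eq]; exact hc, he⟩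

-- per-category booleans: contains on the found set = A's any-over-keywords test
theorem pv_contains_eq (s : String) (cat : String) (kws : List String)
    (h : ∀ p, p ∈ pvKeywords → (p.2 = cat ↔ p.1 ∈ kws))
    (h2 : ∀ k ∈ kws, ∃ p ∈ pvKeywords, p.1 = k ∧ p.2 = cat) :
    PySem.Set.contains
      ((PySem.List.pyRange 0 ((PySem.Str.len s : Int) + 1) 1).foldl
        (fun acc i =>
          pvKeywords.foldl
            (fun acc2 p =>
              -- s.startswith(kw, i): exact for 0 ≤ i (every i of the range) as startswith of s[i:]
            if PySem.Str.startswith (PySem.Str.slice s (some i) none) p.1 then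
                PySem.Set.add acc2 p.2
              else acc2)
            acc)
        PySem.Set.empty) cat =
      kws.any (fun k => PySem.Str.isIn k s) := by
  rw [Bool.eq_iff_iff, PySem.Set.contains_iff, pv_mem_found, List.any_eq_true]
  constructor
  · rintro ⟨p, hp, hin, he⟩
    refine ⟨p.1, (h p hp).mp he, ?_⟩
    rw [PySem.Str.isIn_iff_infix, ← PySem.Chars.isIn_iff_infix]
    exact hin
  · rintro ⟨k, hk, hin⟩
    obtain ⟨p, hp, h1, h2'⟩ := h2 k hk
    refine ⟨p, hp, ?_, h2'⟩
    rw [h1, PySem.Chars.isIn_iff_infix, ← PySem.Str.isIn_iff_infix]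
    exact hin

-- ===== VERDICT (by name: the statement is the Claim_ definition above) =====
theorem categorize_table_py_spec : Claim_equal_categorize_table_py := by
  intro table_name _
  unfold Spec_categorize_table_py categorize_table_py categorize_table_py_alt
  simp only []
  set tl := PySem.Str.lower table_name with htl
  have hF := pv_contains_eq tl "Fuel" ["fuel", "injector", "pulse"]
    (by intro p hp; fin_cases hp <;> simp)
    (by intro k hk; fin_cases hk
        · exact ⟨("fuel", "Fuel"), by simp [pvKeywords], rfl, rfl⟩
        · exact ⟨("injector", "Fuel"), by simp [pvKeywords], rfl, rfl⟩
        · exact ⟨("pulse", "Fuel"), by simp [pvKeywords], rfl, rfl⟩)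
  have hT := pv_contains_eq tl "Timing" ["timing", "ignition"]
    (by intro p hp; fin_cases hp <;> simp)
    (by intro k hk; fin_cases hk
        · exact ⟨("timing", "Timing"), by simp [pvKeywords], rfl, rfl⟩
        · exact ⟨("ignition", "Timing"), by simp [pvKeywords], rfl, rfl⟩)
  have hB := pv_contains_eq tl "Boost" ["boost", "wastegate"]
    (by intro p hp; fin_cases hp <;> simp)
    (by intro k hk; fin_cases hk
        · exact ⟨("boost", "Boost"), by simp [pvKeywords], rfl, rfl⟩
        · exact ⟨("wastegate", "Boost"), by simp [pvKeywords], rfl, rfl⟩)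
  have hI := pv_contains_eq tl "Idle" ["idle", "iac"]
    (by intro p hp; fin_cases hp <;> simp)
    (by intro k hk; fin_cases hk
        · exact ⟨("idle", "Idle"), by simp [pvKeywords], rfl, rfl⟩
        · exact ⟨("iac", "Idle"), by simp [pvKeywords], rfl, rfl⟩)
  have hL := pv_contains_eq tl "Learning" ["learning", "correction"]
    (by intro p hp; fin_cases hp <;> simp)
    (by intro k hk; fin_cases hk
        · exact ⟨("learning", "Learning"), by simp [pvKeywords], rfl, rfl⟩
        · exact ⟨("correction", "Learning"), by simp [pvKeywords], rfl, rfl⟩)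
  simp only [pvPriority, pvFirstIn, hF, hT, hB, hI, hL]
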